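-- pv_equiv track=rewrite | github.com/lbapart/AOC-2024 | day03/main.py | check_right_part
-- ===== SOURCE A (Python) =====
-- def check_right_part(in_str, i):
--     i += 1
--     if i == len(in_str) or not in_str[i].isdigit():
--         return 0
--     str_num = ""
--     while i < len(in_str) and in_str[i].isdigit():
--         str_num += in_str[i]
--         i += 1
--     if i == len(in_str) or in_str[i] != ')':
--         return 0
--     return int(str_num)
-- ===== SOURCE B (Python) =====
-- import re
--
-- _NUM_PAREN = re.compile(r'\d+\)')
--
--
-- def check_right_part(in_str, i):
--     m = _NUM_PAREN.match(in_str[i + 1:])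
--     return int(m.group()[:-1]) if m else 0
-- ===== Notes on version B (the rewrite author's own statement) =====
-- stated objective: idiomatic
-- what changed: Replaces the hand-rolled digit-accumulation while-loop and its two explicit boundary checks with a single precompiled anchored regex match of \d+\) against the slice in_str[i+1:].
-- outside the precondition, e.g. on check_right_part(')1', -2): A returns 1, B returns 0
import Mathlib
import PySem

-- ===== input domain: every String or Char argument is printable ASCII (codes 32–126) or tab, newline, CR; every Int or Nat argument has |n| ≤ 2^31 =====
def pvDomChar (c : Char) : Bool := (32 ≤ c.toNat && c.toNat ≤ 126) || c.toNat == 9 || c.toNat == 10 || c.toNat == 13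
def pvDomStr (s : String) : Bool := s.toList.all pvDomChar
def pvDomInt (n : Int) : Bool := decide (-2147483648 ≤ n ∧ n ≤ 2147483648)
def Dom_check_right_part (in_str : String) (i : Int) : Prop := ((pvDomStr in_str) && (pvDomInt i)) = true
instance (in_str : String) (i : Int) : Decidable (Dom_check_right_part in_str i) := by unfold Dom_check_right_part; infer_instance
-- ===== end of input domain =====

-- B replaces A's hand-rolled digit-accumulation loop and boundary checks by one anchored
-- regex match of \d+\) against the slice in_str[i+1:] (idiomatic; return value only).

-- ===== PORT A =====
-- A's while loop: while i < len(in_str) and in_str[i].isdigit(): str_num += in_str[i]; i += 1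
def crpWhile (cs : List Char) (i : Int) (str_num : List Char) : List Char × Int :=
  if _h : i < (cs.length : Int) ∧ (PySem.List.pyGet? cs i).any PySem.Chars.isdigit = true then
    crpWhile cs (i + 1) (str_num ++ [(PySem.List.pyGet? cs i).getD ' '])
  else (str_num, i)
termination_by ((cs.length : Int) - i).toNat
decreasing_by omega

def check_right_part (in_str : String) (i : Int) : Int :=
  let cs := in_str.toList
  let i1 := i + 1
  -- `(pyGet? …).any isdigit` is `in_str[i].isdigit()`; a `none` (Python: IndexError) is excluded by Pre_
  if i1 = (cs.length : Int) ∨ ¬ ((PySem.List.pyGet? cs i1).any PySem.Chars.isdigit = true) then 0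
  else
    let r := crpWhile cs i1 []
    if r.2 = (cs.length : Int) ∨ ¬ (PySem.List.pyGet? cs r.2 = some ')') then 0
    else (PySem.Int.ofChars? r.1).getD 0   -- int(str_num)

-- ===== PORT B =====
-- regex r'\d+\)' matched ANCHORED against the slice in_str[i+1:]: it matches iff a nonempty
-- digit run at the start of the slice is immediately followed by ')';
-- \d is ported as PySem.Chars.isdigit, exact on the ASCII domain.
def check_right_part_alt (in_str : String) (i : Int) : Int :=
  let rest := PySem.List.slice in_str.toList (some (i + 1)) none   -- in_str[i+1:]
  let ds := rest.takeWhile PySem.Chars.isdigit                     -- the \d+ part of the match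
  if ds ≠ [] ∧ (rest.drop ds.length).head? = some ')' then
    (PySem.Int.ofChars? ds).getD 0   -- int(m.group()[:-1])
  else 0

-- ===== PRECONDITION & SPEC =====
-- Pre_ excludes (a) positions i+1 beyond either end of the string, where A raises IndexError,
-- and (b) negative positions i+1 whose whole suffix in_str[i+1:] consists of digits: there A's
-- manual scan wraps past index -1 around to the FRONT of the string (an accident of Python
-- negative indexing), so its value depends on characters B's slice never sees.
def Pre_check_right_part (in_str : String) (i : Int) : Prop :=
  -(in_str.toList.length : Int) ≤ i + 1 ∧ i + 1 ≤ (in_str.toList.length : Int) ∧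
  (i + 1 < 0 → ∃ c ∈ in_str.toList.drop (in_str.toList.length - (-(i + 1)).toNat),
      ¬ PySem.Chars.isdigit c = true)
instance (in_str : String) (i : Int) : Decidable (Pre_check_right_part in_str i) := by
  unfold Pre_check_right_part; infer_instance
def pvWitness_check_right_part : String × Int := ("mul(3,12)", 5)

def Spec_check_right_part (in_str : String) (i : Int) (out : Int) : Prop := out = check_right_part_alt in_str i
instance (in_str : String) (i : Int) (out : Int) : Decidable (Spec_check_right_part in_str i out) := by unfold Spec_check_right_part; infer_instance

-- ===== CLAIM (what is proved, stated in full; the proofs are below) =====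
def Claim_equal_check_right_part : Prop := ∀ (in_str : String) (i : Int), Dom_check_right_part in_str i → Pre_check_right_part in_str i → Spec_check_right_part in_str i (check_right_part in_str i)

-- ===== LEMMAS AND PROOFS =====

lemma crpWhile_spec (cs : List Char) (p : Nat) (acc : List Char) (hp : p ≤ cs.length) :
    crpWhile cs (p : Int) acc =
      (acc ++ (cs.drop p).takeWhile PySem.Chars.isdigit,
       (p : Int) + (((cs.drop p).takeWhile PySem.Chars.isdigit).length : Int)) := by
  induction hn : cs.length - p generalizing p acc with
  | zero =>
    have hpe : p = cs.length := by omega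
    subst hpe
    rw [crpWhile, dif_neg (by simp)]
    simp
  | succ n ih =>
    have hlt : p < cs.length := by omega
    have hdrop : cs.drop p = cs[p] :: cs.drop (p + 1) := List.drop_eq_getElem_cons hlt
    by_cases hd : PySem.Chars.isdigit cs[p] = true
    · have htw : (cs.drop p).takeWhile PySem.Chars.isdigit
          = cs[p] :: (cs.drop (p + 1)).takeWhile PySem.Chars.isdigit := by
        rw [hdrop, List.takeWhile_cons, if_pos hd]
      rw [crpWhile, dif_pos ⟨by exact_mod_cast hlt,
        by simp [List.getElem?_eq_getElem hlt, hd]⟩]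
      have hcast : (p : Int) + 1 = ((p + 1 : Nat) : Int) := by push_cast; ring
      rw [hcast, ih (p + 1) _ (by omega) (by omega), htw]
      have hgetD : (PySem.List.pyGet? cs ((p : Nat) : Int)).getD ' ' = cs[p] := by
        simp [List.getElem?_eq_getElem hlt]
      rw [hgetD]
      simp only [Prod.mk.injEq, List.length_cons]
      constructor
      · simp
      · push_cast; ring
    · have htw0 : (cs.drop p).takeWhile PySem.Chars.isdigit = [] := by
        rw [hdrop, List.takeWhile_cons, if_neg hd]
      rw [crpWhile, dif_neg (by
        rintro ⟨-, hb⟩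
        rw [PySem.List.pyGet?_natCast, List.getElem?_eq_getElem hlt] at hb
        exact hd (by simpa using hb))]
      rw [htw0]
      simp

-- A's while loop started at a NEGATIVE index -k whose suffix contains a non-digit: the scan
-- stays inside the suffix cs.drop (cs.length - k) and stops at its first non-digit.
lemma crpWhile_spec_neg (cs : List Char) (k : Nat) (acc : List Char)
    (hk : 0 < k) (hkle : k ≤ cs.length)
    (hnd : (((cs.drop (cs.length - k)).takeWhile PySem.Chars.isdigit).length) < k) :
    crpWhile cs (-(k : Int)) acc =
      (acc ++ (cs.drop (cs.length - k)).takeWhile PySem.Chars.isdigit,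
       -(k : Int) + (((cs.drop (cs.length - k)).takeWhile PySem.Chars.isdigit).length : Int)) := by
  induction k generalizing acc with
  | zero => omega
  | succ k ih =>
    have hidx : cs.length - (k + 1) < cs.length := by omega
    have hdrop : cs.drop (cs.length - (k + 1))
        = cs[cs.length - (k + 1)] :: cs.drop (cs.length - k) := by
      have h1 : cs.length - (k + 1) + 1 = cs.length - k := by omega
      rw [List.drop_eq_getElem_cons hidx, h1]
    have hget : PySem.List.pyGet? cs (-((k + 1 : Nat) : Int))
        = some cs[cs.length - (k + 1)] := by
      rw [PySem.List.pyGet?_neg_natCast cs (k + 1) (by omega) hkle,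
        List.getElem?_eq_getElem hidx]
    by_cases hd : PySem.Chars.isdigit cs[cs.length - (k + 1)] = true
    · have htw : (cs.drop (cs.length - (k + 1))).takeWhile PySem.Chars.isdigit
          = cs[cs.length - (k + 1)] :: (cs.drop (cs.length - k)).takeWhile PySem.Chars.isdigit := by
        rw [hdrop, List.takeWhile_cons, if_pos hd]
      have hk0 : 0 < k := by
        rcases Nat.eq_zero_or_pos k with h0 | h0
        · subst h0
          rw [htw] at hnd
          simp at hnd
        · exact h0
      have hnd' : ((cs.drop (cs.length - k)).takeWhile PySem.Chars.isdigit).length < k := by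
        rw [htw] at hnd
        simp only [List.length_cons] at hnd
        omega
      rw [crpWhile, dif_pos ⟨by omega,
        by rw [hget]; simpa using hd⟩]
      have hcast : -((k + 1 : Nat) : Int) + 1 = -((k : Nat) : Int) := by push_cast; ring
      rw [hcast, ih _ hk0 (by omega) hnd', htw]
      have hgetD : (PySem.List.pyGet? cs (-((k + 1 : Nat) : Int))).getD ' '
          = cs[cs.length - (k + 1)] := by rw [hget]; rfl
      rw [hgetD]
      simp only [Prod.mk.injEq, List.length_cons]
      constructor
      · simp
      · push_cast; ring
    · have htw0 : (cs.drop (cs.length - (k + 1))).takeWhile PySem.Chars.isdigit = [] := by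
        rw [hdrop, List.takeWhile_cons, if_neg hd]
      rw [crpWhile, dif_neg (by
        rintro ⟨-, hb⟩
        rw [hget] at hb
        exact hd (by simpa using hb))]
      rw [htw0]
      simp

-- ===== VERDICT (by name: the statement is the Claim_ definition above) =====
theorem check_right_part_spec : Claim_equal_check_right_part := by
  intro s i hdom hpre
  unfold Spec_check_right_part
  obtain ⟨hlo, hhi, hwrap⟩ := hpre
  rcases (by omega : 0 ≤ i + 1 ∨ i + 1 < 0) with hpos | hneg
  · -- natural positions 0 ≤ i+1 ≤ len: the slice is cs.drop p
    obtain ⟨p, hp⟩ : ∃ p : Nat, i + 1 = (p : Int) := ⟨(i + 1).toNat, by omega⟩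
    have hple : p ≤ s.toList.length := by omega
    simp only [check_right_part, check_right_part_alt, hp]
    rw [PySem.List.slice_from_natCast]
    by_cases hpl : p = s.toList.length
    · rw [if_pos (Or.inl (by exact_mod_cast hpl))]
      rw [hpl, List.drop_length]
      simp
    · have hlt : p < s.toList.length := by omega
      have hget : PySem.List.pyGet? s.toList ((p : Nat) : Int) = some s.toList[p] := by
        simp [List.getElem?_eq_getElem hlt]
      have hdrop : s.toList.drop p = s.toList[p] :: s.toList.drop (p + 1) :=
        List.drop_eq_getElem_cons hlt
      by_cases hd : PySem.Chars.isdigit s.toList[p] = true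
      · -- digit at position p: A runs the loop, B's regex has a nonempty digit run
        rw [if_neg (by
          rintro (ha | hb)
          · exact hpl (by exact_mod_cast ha)
          · exact hb (by rw [hget]; simpa using hd))]
        rw [crpWhile_spec s.toList p [] hple]
        dsimp only
        set D := (s.toList.drop p).takeWhile PySem.Chars.isdigit with hD
        have hcast2 : (p : Int) + (D.length : Int) = ((p + D.length : Nat) : Int) := by
          push_cast; ring
        rw [List.nil_append, hcast2]
        have hDne : D ≠ [] := by
          rw [hD, hdrop, List.takeWhile_cons, if_pos hd]; simp
        have hDle : p + D.length ≤ s.toList.length := by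
          have hpre : D.length ≤ (s.toList.drop p).length :=
            (List.takeWhile_prefix _).length_le
          rw [List.length_drop] at hpre
          omega
        have hhead : ((s.toList.drop p).drop D.length).head? = s.toList[p + D.length]? := by
          rw [List.drop_drop, Nat.add_comm, List.head?_drop]
        by_cases hend : p + D.length = s.toList.length
        · rw [if_pos (Or.inl (by exact_mod_cast hend))]
          rw [if_neg (by
            rintro ⟨-, hh⟩
            rw [hhead, List.getElem?_eq_none (by omega)] at hh
            simp at hh)]
        · have hlt2 : p + D.length < s.toList.length := by omega
          have hget2 : PySem.List.pyGet? s.toList (Nat.cast (p + D.length)) =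
              some s.toList[p + D.length] := by
            rw [PySem.List.pyGet?_natCast, List.getElem?_eq_getElem hlt2]
          by_cases hpar : s.toList[p + D.length] = ')'
          · rw [if_neg (by
              rintro (ha | hb)
              · exact hend (by exact_mod_cast ha)
              · exact hb (by rw [hget2, hpar]))]
            rw [if_pos ⟨hDne, by rw [hhead, List.getElem?_eq_getElem hlt2, hpar]⟩]
          · rw [if_pos (Or.inr (by rw [hget2]; simp [hpar]))]
            rw [if_neg (by
              rintro ⟨-, hh⟩
              rw [hhead, List.getElem?_eq_getElem hlt2] at hh
              exact hpar (Option.some.inj hh))]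
      · -- no digit at position p: both return 0
        have htw0 : (s.toList.drop p).takeWhile PySem.Chars.isdigit = [] := by
          rw [hdrop, List.takeWhile_cons, if_neg hd]
        rw [if_pos (Or.inr (by rw [hget]; simpa using hd))]
        rw [if_neg (by rintro ⟨hne, -⟩; exact hne htw0)]
  · -- negative positions -len ≤ i+1 < 0 with a non-digit in the suffix: A's scan and B's
    -- slice both read exactly the suffix cs.drop (len - k)
    obtain ⟨k, hk⟩ : ∃ k : Nat, i + 1 = -(k : Int) := ⟨(-(i + 1)).toNat, by omega⟩
    have hk0 : 0 < k := by omega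
    have hkle : k ≤ s.toList.length := by omega
    obtain ⟨c, hcmem, hcnd⟩ := hwrap hneg
    have hkt : (-(i + 1)).toNat = k := by omega
    rw [hkt] at hcmem
    simp only [check_right_part, check_right_part_alt, hk]
    rw [PySem.List.slice_from_neg_natCast s.toList k hk0]
    set D := (s.toList.drop (s.toList.length - k)).takeWhile PySem.Chars.isdigit with hD
    have hsuf : (s.toList.drop (s.toList.length - k)).length = k := by
      rw [List.length_drop]; omega
    have hDlt : D.length < k := by
      have hle : D.length ≤ (s.toList.drop (s.toList.length - k)).length := by
        rw [hD]; exact (List.takeWhile_prefix _).length_le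
      rcases Nat.lt_or_ge D.length k with h | h
      · exact h
      · exfalso
        have hlen2 : ((s.toList.drop (s.toList.length - k)).takeWhile PySem.Chars.isdigit).length
            = (s.toList.drop (s.toList.length - k)).length := by
          rw [← hD]; omega
        have hts : (s.toList.drop (s.toList.length - k)).takeWhile PySem.Chars.isdigit
            = s.toList.drop (s.toList.length - k) :=
          (List.takeWhile_prefix _).eq_of_length hlen2
        exact hcnd (List.takeWhile_eq_self_iff.mp hts c hcmem)
    have hidx : s.toList.length - k < s.toList.length := by omega
    have hget : PySem.List.pyGet? s.toList (-(k : Int))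
        = some s.toList[s.toList.length - k] := by
      rw [PySem.List.pyGet?_neg_natCast s.toList k hk0 hkle,
        List.getElem?_eq_getElem hidx]
    have hdrop : s.toList.drop (s.toList.length - k)
        = s.toList[s.toList.length - k] :: s.toList.drop (s.toList.length - k + 1) :=
      List.drop_eq_getElem_cons hidx
    have hne : ¬ (-(k : Int) = (s.toList.length : Int)) := by omega
    by_cases hd : PySem.Chars.isdigit s.toList[s.toList.length - k] = true
    · rw [if_neg (by
        rintro (ha | hb)
        · exact hne ha
        · exact hb (by rw [hget]; simpa using hd))]
      rw [crpWhile_spec_neg s.toList k [] hk0 hkle (hD ▸ hDlt)]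
      dsimp only
      rw [List.nil_append, ← hD]
      have hne2 : ¬ (-(k : Int) + (D.length : Int) = (s.toList.length : Int)) := by
        have : (D.length : Int) < (k : Int) := by exact_mod_cast hDlt
        omega
      have hcast3 : -(k : Int) + (D.length : Int) = -(((k - D.length : Nat)) : Int) := by
        have : D.length ≤ k := by omega
        push_cast [this]
        ring
      have hidx2 : s.toList.length - (k - D.length) < s.toList.length := by omega
      have hget2 : PySem.List.pyGet? s.toList (-(k : Int) + (D.length : Int))
          = some s.toList[s.toList.length - (k - D.length)] := by
        rw [hcast3, PySem.List.pyGet?_neg_natCast s.toList (k - D.length) (by omega) (by omega),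
          List.getElem?_eq_getElem hidx2]
      have hhead : ((s.toList.drop (s.toList.length - k)).drop D.length).head?
          = s.toList[s.toList.length - (k - D.length)]? := by
        rw [List.drop_drop, List.head?_drop]
        congr 1
        omega
      by_cases hpar : s.toList[s.toList.length - (k - D.length)] = ')'
      · rw [if_neg (by
          rintro (ha | hb)
          · exact hne2 ha
          · exact hb (by rw [hget2, hpar]))]
        rw [if_pos ⟨by
            rw [hD, hdrop, List.takeWhile_cons, if_pos hd]; simp,
          by rw [hhead, List.getElem?_eq_getElem hidx2, hpar]⟩]
      · rw [if_pos (Or.inr (by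
          rw [hget2]; exact fun h => hpar (Option.some.inj h)))]
        rw [if_neg (by
          rintro ⟨-, hh⟩
          rw [hhead, List.getElem?_eq_getElem hidx2] at hh
          exact hpar (Option.some.inj hh))]
    · have htw0 : D = [] := by
        rw [hD, hdrop, List.takeWhile_cons, if_neg hd]
      rw [if_pos (Or.inr (by rw [hget]; simpa using hd))]
      rw [if_neg (by rintro ⟨hne', -⟩; exact hne' htw0)]
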